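-- pv_equiv track=rewrite | github.com/Martin-Seysen/mmgroup_fast | src/mmgroup_fast/dev/case_2B/axis_class_2B_2group.py | iter_samples
-- ===== SOURCE A (Python) =====
-- def iter_samples(lst, n):
--     if n >= len(lst):
--         if n == len(lst):
--             yield lst[:]
--     elif n == 1:
--         for x in lst:
--             yield [x]
--     else:
--         for i, x in enumerate(lst):
--             for l1 in iter_samples(lst[:i] + lst[i+1:], n-1):
--                 yield [x] + l1
-- ===== SOURCE B (Python) =====
-- def iter_samples(lst, n):
--     # Iterative explicit-stack DFS instead of A's recursive generator.
--     if n > len(lst):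
--         return
--     if n == len(lst):
--         yield lst[:]
--         return
--     if n < 1:
--         return
--     stack = [([], lst)]
--     while stack:
--         prefix, rem = stack.pop()
--         if len(prefix) == n:
--             yield prefix
--         else:
--             for i in range(len(rem) - 1, -1, -1):
--                 stack.append((prefix + [rem[i]], rem[:i] + rem[i + 1:]))
-- ===== Notes on version B (the rewrite author's own statement) =====
-- stated objective: alternative
-- what changed: Replaces A's recursive generator (with special n==1 branch) by an iterative explicit-stack DFS over (prefix, remaining) states, pushing children in reverse index order so the LIFO stack reproduces A's left-to-right output order.
import Mathlib
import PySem

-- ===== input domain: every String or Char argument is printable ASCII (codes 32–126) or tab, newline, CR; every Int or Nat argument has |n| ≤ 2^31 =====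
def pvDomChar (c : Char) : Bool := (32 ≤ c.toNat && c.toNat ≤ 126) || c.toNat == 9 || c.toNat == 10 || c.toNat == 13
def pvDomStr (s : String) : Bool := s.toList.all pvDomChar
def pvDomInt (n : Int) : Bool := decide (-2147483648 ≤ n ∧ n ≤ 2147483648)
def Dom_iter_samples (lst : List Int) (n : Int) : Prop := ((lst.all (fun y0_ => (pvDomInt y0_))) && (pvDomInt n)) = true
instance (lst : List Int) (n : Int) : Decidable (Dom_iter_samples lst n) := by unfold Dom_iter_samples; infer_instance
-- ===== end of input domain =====

-- B replaces A's recursive generator by an iterative explicit-stack DFS; same outputs in the same order (objective: alternative).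

-- ===== PORT A =====
-- A is a generator; its port returns the list of yielded values in order.
-- lst[:i] + lst[i+1:] with 0 ≤ i < len lst is exactly take i ++ drop (i+1); .attach is only for termination.
def iter_samples (lst : List Int) (n : Int) : List (List Int) :=
  if n ≥ (lst.length : Int) then
    (if n = (lst.length : Int) then [lst] else [])
  else if n = 1 then
    lst.map (fun x => [x])
  else
    (PySem.List.enumerate lst).attach.flatMap (fun ix =>
      (iter_samples (lst.take ix.1.1.toNat ++ lst.drop (ix.1.1.toNat + 1)) (n - 1)).map
        (fun l1 => ix.1.2 :: l1))
termination_by lst.length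
decreasing_by
  obtain ⟨k, hk, hp⟩ := (PySem.List.mem_enumerate_iff _ _ _).mp ix.2
  simp [hp]
  omega

-- ===== PORT B =====
-- weight used only for termination of the stack loop
def pvW (s : List Int × List Int) : Nat := (s.2.length + 1).factorial

def pvStackMeas (st : List (List Int × List Int)) : Nat := (st.map pvW).sum

-- the children pushed for state (pfx, rem): B pushes indices len-1 … 0 onto a
-- LIFO stack, so after the pushes the stack holds them in ascending index order.
def pvChildren (pfx rem : List Int) : List (List Int × List Int) :=
  (List.range rem.length).map (fun i =>
    (pfx ++ [rem.getD i 0], rem.take i ++ rem.drop (i + 1)))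

theorem pvChildren_meas (pfx rem : List Int) :
    pvStackMeas (pvChildren pfx rem) = rem.length * rem.length.factorial := by
  unfold pvStackMeas pvChildren
  rw [List.map_map]
  have h : ((List.range rem.length).map (pvW ∘ fun i =>
      (pfx ++ [rem.getD i 0], rem.take i ++ rem.drop (i + 1)))) =
      (List.range rem.length).map (fun _ => rem.length.factorial) := by
    apply List.map_congr_left
    intro i hi
    have hi' : i < rem.length := List.mem_range.mp hi
    simp [pvW]
    congr 1
    omega
  rw [h]
  simp [List.map_const', List.sum_replicate]

theorem pvChildren_meas_lt (pfx rem : List Int) :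
    pvStackMeas (pvChildren pfx rem) < pvW (pfx, rem) := by
  rw [pvChildren_meas]
  show _ < (rem.length + 1).factorial
  rw [Nat.factorial_succ]
  have := Nat.factorial_pos rem.length
  nlinarith

-- the while loop over the explicit stack (top = head)
def pvRunStack (n : Int) : List (List Int × List Int) → List (List Int)
  | [] => []
  | s :: st =>
    if (s.1.length : Int) = n then s.1 :: pvRunStack n st
    else pvRunStack n (pvChildren s.1 s.2 ++ st)
termination_by st => pvStackMeas st
decreasing_by
  · unfold pvStackMeas
    simp only [List.map_cons, List.sum_cons]
    have := Nat.factorial_pos (s.2.length + 1)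
    show _ < pvW s + _
    unfold pvW
    omega
  · show pvStackMeas (pvChildren s.1 s.2 ++ st) < pvStackMeas (s :: st)
    have h1 : pvStackMeas (pvChildren s.1 s.2 ++ st) =
        pvStackMeas (pvChildren s.1 s.2) + pvStackMeas st := by
      unfold pvStackMeas; simp
    have h2 : pvStackMeas (s :: st) = pvW s + pvStackMeas st := by
      unfold pvStackMeas; simp
    have h3 := pvChildren_meas_lt s.1 s.2
    rw [Prod.mk.eta] at h3
    omega

def iter_samples_alt (lst : List Int) (n : Int) : List (List Int) :=
  if n > (lst.length : Int) then []
  else if n = (lst.length : Int) then [lst]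
  else if n < 1 then []
  else pvRunStack n [([], lst)]

-- ===== PRECONDITION & SPEC =====
def Spec_iter_samples (lst : List Int) (n : Int) (out : List (List Int)) : Prop := out = iter_samples_alt lst n
instance (lst : List Int) (n : Int) (out : List (List Int)) : Decidable (Spec_iter_samples lst n out) := by unfold Spec_iter_samples; infer_instance

-- ===== CLAIM (what is proved, stated in full; the proofs are below) =====
def Claim_equal_iter_samples : Prop := ∀ (lst : List Int) (n : Int), Dom_iter_samples lst n → Spec_iter_samples lst n (iter_samples lst n)

-- ===== LEMMAS AND PROOFS =====

-- the loop processes the stack left to right: it is linear over append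
theorem pvRunStack_append_aux (n : Int) :
    ∀ (k : Nat) (st1 st2 : List (List Int × List Int)), pvStackMeas st1 ≤ k →
      pvRunStack n (st1 ++ st2) = pvRunStack n st1 ++ pvRunStack n st2 := by
  intro k
  induction k with
  | zero =>
    intro st1 st2 h
    cases st1 with
    | nil => simp [pvRunStack]
    | cons s t =>
      exfalso
      have h1 : pvStackMeas (s :: t) = pvW s + pvStackMeas t := by
        unfold pvStackMeas; simp
      have := Nat.factorial_pos (s.2.length + 1)
      unfold pvW at h1
      omega
  | succ k ih =>
    intro st1 st2 h
    cases st1 with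
    | nil => simp [pvRunStack]
    | cons s t =>
      have hmeas : pvStackMeas (s :: t) = pvW s + pvStackMeas t := by
        unfold pvStackMeas; simp
      have hw : 1 ≤ pvW s := Nat.factorial_pos _
      by_cases hl : (s.1.length : Int) = n
      · rw [List.cons_append, pvRunStack, pvRunStack]
        simp only [hl, if_true]
        rw [ih t st2 (by omega)]
        simp
      · rw [List.cons_append, pvRunStack, pvRunStack]
        simp only [hl, if_false]
        rw [← List.append_assoc]
        have hcm : pvStackMeas (pvChildren s.1 s.2 ++ t) ≤ k := by
          have h1 : pvStackMeas (pvChildren s.1 s.2 ++ t) =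
              pvStackMeas (pvChildren s.1 s.2) + pvStackMeas t := by
            unfold pvStackMeas; simp
          have h3 := pvChildren_meas_lt s.1 s.2
          rw [Prod.mk.eta] at h3
          omega
        exact ih _ st2 hcm

theorem pvRunStack_append (n : Int) (st1 st2 : List (List Int × List Int)) :
    pvRunStack n (st1 ++ st2) = pvRunStack n st1 ++ pvRunStack n st2 :=
  pvRunStack_append_aux n (pvStackMeas st1) st1 st2 le_rfl

theorem pvRunStack_flatMap (n : Int) (st : List (List Int × List Int)) :
    pvRunStack n st = st.flatMap (fun s => pvRunStack n [s]) := by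
  induction st with
  | nil => simp [pvRunStack]
  | cons s t ih =>
    have : s :: t = [s] ++ t := rfl
    rw [this, pvRunStack_append, ih]
    simp

theorem pv_flatMap_congr {α β : Type} (l : List α) (f g : α → List β)
    (h : ∀ x ∈ l, f x = g x) : l.flatMap f = l.flatMap g := by
  induction l with
  | nil => rfl
  | cons a t ih =>
    simp only [List.flatMap_cons]
    rw [h a (List.mem_cons_self), ih (fun x hx => h x (List.mem_cons_of_mem a hx))]

theorem pv_flatMap_single {α β : Type} (l : List α) (f : α → β) :
    l.flatMap (fun x => [f x]) = l.map f := by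
  induction l with
  | nil => rfl
  | cons a t ih => simp [ih]

theorem pv_flatMap_attach {α β : Type} (l : List α) (f : α → List β) :
    l.attach.flatMap (fun x => f x.1) = l.flatMap f := by
  rw [List.flatMap_def, List.flatMap_def, show (fun (x : {x // x ∈ l}) => f x.1) = f ∘ Subtype.val from rfl,
    ← List.map_map, List.attach_map_subtype_val]

-- indexing helper: mapping over range with getD is mapping over the list
theorem pv_map_range_getD {β : Type} (g : Int → β) :
    ∀ (l : List Int), (List.range l.length).map (fun i => g (l.getD i 0)) = l.map g := by
  intro l
  induction l with
  | nil => simp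
  | cons x xs ih =>
    simp only [List.length_cons, List.range_succ_eq_map, List.map_cons, List.map_map,
      List.getD_cons_zero]
    rw [show ((List.range xs.length).map ((fun i => g ((x :: xs).getD i 0)) ∘ Nat.succ)) =
        (List.range xs.length).map (fun i => g (xs.getD i 0)) from
      List.map_congr_left (fun i _ => by simp)]
    rw [ih]

theorem pv_enum (l : List Int) : ∀ (s : Int),
    PySem.List.enumerate l s = (List.range l.length).map (fun (i : Nat) => (s + (i : Int), l.getD i 0)) := by
  induction l with
  | nil => intro s; simp [PySem.List.enumerate_nil]
  | cons x xs ih =>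
    intro s
    rw [PySem.List.enumerate_cons, ih (s + 1)]
    simp only [List.length_cons, List.range_succ_eq_map, List.map_cons, List.map_map]
    congr 1
    · simp
    · apply List.map_congr_left
      intro i _
      simp only [Function.comp, List.getD_cons_succ, Prod.mk.injEq]
      constructor
      · push_cast; ring
      · trivial

-- A yields nothing for non-positive n strictly below the length
theorem pvA_nonpos : ∀ (m : Nat) (lst : List Int) (n : Int), lst.length ≤ m →
    n ≤ 0 → n < lst.length → iter_samples lst n = [] := by
  intro m
  induction m with
  | zero =>
    intro lst n hm h0 hlen
    have hl : lst = [] := List.eq_nil_of_length_eq_zero (by omega)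
    subst hl
    rw [iter_samples]
    simp only [List.length_nil]
    have h1 : ¬ n ≥ ((0 : Nat) : Int) := by omega
    simp [PySem.List.enumerate_nil]
    omega
  | succ m ih =>
    intro lst n hm h0 hlen
    rw [iter_samples]
    have h1 : ¬ n ≥ (lst.length : Int) := by omega
    have h2 : n ≠ 1 := by omega
    simp only [h1, if_false, h2]
    apply List.flatMap_eq_nil_iff.mpr
    intro ix hix
    obtain ⟨k, hk, hp⟩ := (PySem.List.mem_enumerate_iff _ _ _).mp ix.2
    have hnat : ix.1.1.toNat = k := by rw [hp]; simp
    rw [hnat]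
    rw [ih (lst.take k ++ lst.drop (k + 1)) (n - 1) (by simp; omega) (by omega)
      (by simp; omega)]
    simp

-- main DFS lemma: a state (pfx, rem) with 1 ≤ n - |pfx| < |rem| emits exactly
-- A's samples of rem of size n - |pfx|, each prefixed with pfx
theorem pv_emit : ∀ (m : Nat) (rem pfx : List Int) (n : Int), rem.length ≤ m →
    1 ≤ n - pfx.length → n - pfx.length < rem.length →
    pvRunStack n [(pfx, rem)] = (iter_samples rem (n - pfx.length)).map (fun l => pfx ++ l) := by
  intro m
  induction m with
  | zero => intro rem pfx n hm h1 h2; omega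
  | succ m ih =>
    intro rem pfx n hm h1 h2
    have hne : ¬ ((pfx.length : Int) = n) := by omega
    rw [pvRunStack]
    simp only [hne, if_false, List.append_nil]
    rw [pvRunStack_flatMap]
    unfold pvChildren
    rw [List.flatMap_map]
    by_cases hk1 : n - (pfx.length : Int) = 1
    · -- every child prefix has length n: each emits itself
      have hstep : ∀ i ∈ List.range rem.length,
          pvRunStack n [(pfx ++ [rem.getD i 0], rem.take i ++ rem.drop (i + 1))] =
          [pfx ++ [rem.getD i 0]] := by
        intro i _
        have hc : ((pfx ++ [rem.getD i 0]).length : Int) = n := by simp; omega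
        rw [pvRunStack, if_pos hc, pvRunStack]
      rw [pv_flatMap_congr (List.range rem.length)
        (fun i => pvRunStack n [(pfx ++ [rem.getD i 0], rem.take i ++ rem.drop (i + 1))])
        (fun i => [pfx ++ [rem.getD i 0]]) hstep]
      rw [iter_samples]
      simp only [hk1]
      rw [if_neg (by omega : ¬ ((1 : Int) ≥ (rem.length : Int))), if_pos trivial, List.map_map]
      rw [pv_flatMap_single (List.range rem.length) (fun i => pfx ++ [rem.getD i 0]),
        pv_map_range_getD (fun x => pfx ++ [x]) rem]
      rfl
    · -- recursive case: each child state corresponds to a branch of A's recursion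
      rw [iter_samples]
      have hb1 : ¬ (n - (pfx.length : Int) ≥ (rem.length : Int)) := by omega
      simp only [hb1, if_false, hk1]
      rw [List.map_flatMap]
      -- flatMap over attach = flatMap over the list
      refine Eq.trans ?_ (pv_flatMap_attach (PySem.List.enumerate rem) (fun p =>
        ((iter_samples (rem.take p.1.toNat ++ rem.drop (p.1.toNat + 1))
          (n - (pfx.length : Int) - 1)).map (fun l1 => p.2 :: l1)).map (fun l => pfx ++ l))).symm
      rw [pv_enum rem 0, List.flatMap_map]
      apply pv_flatMap_congr
      intro i hi
      have hi' : i < rem.length := List.mem_range.mp hi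
      have hnat : ((0 : Int) + (i : Int)).toNat = i := by omega
      rw [hnat]
      have hlen : (rem.take i ++ rem.drop (i + 1)).length = rem.length - 1 := by
        simp; omega
      rw [ih (rem.take i ++ rem.drop (i + 1)) (pfx ++ [rem.getD i 0]) n (by omega)
        (by simp; omega) (by simp; omega)]
      have harg : n - ((pfx ++ [rem.getD i 0]).length : Int) = n - (pfx.length : Int) - 1 := by
        simp; omega
      rw [harg, List.map_map]
      apply List.map_congr_left
      intro l _
      simp

-- ===== VERDICT (by name: the statement is the Claim_ definition above) =====
theorem iter_samples_spec : Claim_equal_iter_samples := by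
  intro lst n _
  show iter_samples lst n = iter_samples_alt lst n
  unfold iter_samples_alt
  by_cases hgt : n > (lst.length : Int)
  · rw [iter_samples]
    have h1 : n ≥ (lst.length : Int) := by omega
    have h2 : n ≠ (lst.length : Int) := by omega
    simp [hgt, h1, h2]
  · by_cases heq : n = (lst.length : Int)
    · rw [iter_samples]
      simp [heq]
    · have hlt : n < (lst.length : Int) := by omega
      by_cases hn1 : n < 1
      · simp only [hgt, if_false, heq, hn1, if_true]
        exact pvA_nonpos lst.length lst n le_rfl (by omega) hlt
      · simp only [hgt, if_false, heq, hn1]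
        have := pv_emit lst.length lst [] n le_rfl (by simp; omega) (by simp; omega)
        simp only [List.length_nil, Nat.cast_zero, Int.sub_zero] at this
        rw [this]
        simp
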